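-- pv_equiv track=rewrite | github.com/tkhadir/AdventOfCode2018 | day2.py | compute
-- ===== SOURCE A (Python) =====
-- def contains(data, value):
--     found = False
--     for o in data:
--         if o == value:
--             found = True
--             break
--     return found
--
-- def getUnique(phrase):
--     result = []
--     for c in list(phrase):
--         if (not contains(result, c)):
--             result.append(c)
--     return result
--
-- def containByOccurence(character, phrase, occurences):
--     count = 0
--     for c in list(phrase):
--         if (character == c):
--             count+=1
--     return (count == occurences)
--
-- def compute(data):
--     countTwice = 0
--     countThreeTimes = 0
--     for d in data.split('\n'):
--         checkedThree = False
--         checkedTwice = False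
--         for c in getUnique(d):
--             if (containByOccurence(c, d, 3) and (not checkedThree)):
--                 countThreeTimes+=1
--                 checkedThree = True
--             elif (containByOccurence(c, d, 2) and (not checkedTwice)):
--                 countTwice+=1
--                 checkedTwice = True
--     return (countTwice * countThreeTimes)
-- ===== SOURCE B (Python) =====
-- def compute(data):
--     countTwice = 0
--     countThreeTimes = 0
--     for line in data.split('\n'):
--         counts = {}
--         for ch in line:
--             counts[ch] = counts.get(ch, 0) + 1
--         values = counts.values()
--         if 2 in values:
--             countTwice += 1
--         if 3 in values:
--             countThreeTimes += 1
--     return countTwice * countThreeTimes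
-- ===== Notes on version B (the rewrite author's own statement) =====
-- stated objective: faster
-- what changed: One frequency-dict pass per line plus two membership tests on its values replace A's per-line dedup (with a linear membership scan per character) and a full recount of the line for every unique character.
import Mathlib
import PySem

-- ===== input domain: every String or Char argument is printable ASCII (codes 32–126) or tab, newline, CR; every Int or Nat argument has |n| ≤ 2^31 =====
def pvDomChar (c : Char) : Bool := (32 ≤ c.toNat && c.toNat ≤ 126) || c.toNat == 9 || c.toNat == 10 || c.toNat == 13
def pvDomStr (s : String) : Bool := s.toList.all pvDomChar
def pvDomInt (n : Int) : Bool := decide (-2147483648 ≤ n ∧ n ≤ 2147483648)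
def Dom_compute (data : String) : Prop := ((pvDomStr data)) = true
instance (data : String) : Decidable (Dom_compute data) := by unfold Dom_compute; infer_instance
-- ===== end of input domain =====

-- B builds one character-frequency dict per line and tests 2/3 membership in its values,
-- replacing A's per-line dedup (linear membership scan per character) and full recount of
-- the line for every unique character.


-- ===== PORT A =====
-- contains(data, value): linear scan with early break
def containsA : List Char → Char → Bool
  | [], _ => false
  | o :: rest, value => if o == value then true else containsA rest value

-- getUnique(phrase)
def getUniqueA (phrase : List Char) : List Char :=
  phrase.foldl (fun result c => if !(containsA result c) then result ++ [c] else result) []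

-- containByOccurence(character, phrase, occurences)
def containByOccurenceA (character : Char) (phrase : List Char) (occurences : Int) : Bool :=
  (phrase.foldl (fun count c => if character == c then count + 1 else count) (0 : Int)) == occurences

-- body of A's inner loop; state = (countTwice, countThreeTimes, checkedThree, checkedTwice)
def stepA (d : List Char) (s : Int × Int × Bool × Bool) (c : Char) : Int × Int × Bool × Bool :=
  if containByOccurenceA c d 3 && !s.2.2.1 then (s.1, s.2.1 + 1, true, s.2.2.2)
  else if containByOccurenceA c d 2 && !s.2.2.2 then (s.1 + 1, s.2.1, s.2.2.1, true)
  else s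

-- one iteration of A's outer loop over data.split('\n')
def computeStepA (st : Int × Int) (d : List Char) : Int × Int :=
  let r := (getUniqueA d).foldl (stepA d) (st.1, st.2, false, false)
  (r.1, r.2.1)

def compute (data : String) : Int :=
  let r := (PySem.Chars.splitOn data.toList ['\n']).foldl computeStepA (0, 0)
  r.1 * r.2

-- ===== PORT B =====
-- one iteration of B's loop: counts = frequency dict of the line, then membership in values
def computeStepB (st : Int × Int) (line : List Char) : Int × Int :=
  let counts := line.foldl (fun d ch => d.insert ch (d.getD ch 0 + 1)) (PySem.Dict.empty : PySem.Dict Char Int)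
  let values := counts.values
  let st1 := if values.contains (2 : Int) then (st.1 + 1, st.2) else st
  if values.contains (3 : Int) then (st1.1, st1.2 + 1) else st1

def compute_alt (data : String) : Int :=
  let r := (PySem.Chars.splitOn data.toList ['\n']).foldl computeStepB (0, 0)
  r.1 * r.2

-- ===== PRECONDITION & SPEC =====
def Spec_compute (data : String) (out : Int) : Prop := out = compute_alt data
instance (data : String) (out : Int) : Decidable (Spec_compute data out) := by unfold Spec_compute; infer_instance

-- ===== CLAIM (what is proved, stated in full; the proofs are below) =====
def Claim_equal_compute : Prop := ∀ (data : String), Dom_compute data → Spec_compute data (compute data)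

-- ===== LEMMAS AND PROOFS =====

theorem containsA_iff (xs : List Char) (v : Char) : containsA xs v = true ↔ v ∈ xs := by
  induction xs with
  | nil => simp [containsA]
  | cons o rest ih =>
    simp only [containsA]
    split_ifs with h
    · simp only [beq_iff_eq] at h; subst h; simp
    · simp only [beq_iff_eq] at h
      simp [ih, List.mem_cons]; intro hv; exact absurd hv.symm h

theorem containByOccurenceA_eq (c : Char) (d : List Char) (n : Int) :
    containByOccurenceA c d n = ((d.count c : Int) == n) := by
  unfold containByOccurenceA
  have h : (fun (count : Int) (x : Char) => if c == x then count + 1 else count)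
      = (fun (count : Int) (x : Char) => if x == c then count + 1 else count) := by
    funext a x; rw [BEq.comm]
  rw [h, PySem.List.foldl_beq_add_one]
  simp

theorem mem_getUniqueA_aux (d acc : List Char) (c : Char) :
    c ∈ d.foldl (fun result x => if !(containsA result x) then result ++ [x] else result) acc
      ↔ c ∈ acc ∨ c ∈ d := by
  induction d generalizing acc with
  | nil => simp
  | cons x rest ih =>
    simp only [List.foldl_cons]
    rw [ih]
    by_cases h : containsA acc x = true
    · have hx := (containsA_iff acc x).mp h
      simp [h, List.mem_cons]
      constructor
      · tauto
      · rintro (h1 | rfl | h2) <;> tauto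
    · simp [h, List.mem_append, List.mem_cons]
      tauto

theorem mem_getUniqueA (c : Char) (d : List Char) : c ∈ getUniqueA d ↔ c ∈ d := by
  unfold getUniqueA; rw [mem_getUniqueA_aux]; simp

-- A's inner loop, characterised: each counter goes up by one iff (flag not yet set and) some
-- character of the unique list occurs exactly 2 (resp. 3) times in the line.
theorem innerA_char (d : List Char) (u : List Char) (t2 t3 : Int) (c3 c2 : Bool) :
    u.foldl (stepA d) (t2, t3, c3, c2)
    = (t2 + (if !c2 && u.any (fun c => d.count c == 2) then 1 else 0),
       t3 + (if !c3 && u.any (fun c => d.count c == 3) then 1 else 0),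
       c3 || u.any (fun c => d.count c == 3),
       c2 || u.any (fun c => d.count c == 2)) := by
  induction u generalizing t2 t3 c3 c2 with
  | nil => simp
  | cons x rest ih =>
    simp only [List.foldl_cons]
    by_cases h3 : List.count x d = 3
    · have h2 : ¬ List.count x d = 2 := by omega
      by_cases hc3 : c3
      · rw [show stepA d (t2, t3, c3, c2) x = (t2, t3, c3, c2) from by
          simp [stepA, containByOccurenceA_eq, h3, hc3], ih]
        simp [h3, hc3]
      · rw [show stepA d (t2, t3, c3, c2) x = (t2, t3 + 1, true, c2) from by
          simp [stepA, containByOccurenceA_eq, h3, hc3], ih]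
        simp [h3, hc3]
    · by_cases h2 : List.count x d = 2
      · by_cases hc2 : c2
        · rw [show stepA d (t2, t3, c3, c2) x = (t2, t3, c3, c2) from by
            simp [stepA, containByOccurenceA_eq, h2, hc2], ih]
          simp [h2, hc2]
        · rw [show stepA d (t2, t3, c3, c2) x = (t2 + 1, t3, c3, true) from by
            simp [stepA, containByOccurenceA_eq, h2, hc2], ih]
          simp [h2, hc2]
      · have hb3 : (List.count x d == 3) = false := by simpa using h3
        have hb2 : (List.count x d == 2) = false := by simpa using h2
        have hi3 : ¬((List.count x d : Int) = 3) := by exact_mod_cast h3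
        have hi2 : ¬((List.count x d : Int) = 2) := by exact_mod_cast h2
        rw [show stepA d (t2, t3, c3, c2) x = (t2, t3, c3, c2) from by
          simp [stepA, containByOccurenceA_eq, hi3, hi2], ih]
        simp [hb3, hb2]

-- B's frequency dict is Counter(line): its values are the counts of the distinct characters
theorem values_counts (line : List Char) :
    (line.foldl (fun d ch => d.insert ch (d.getD ch 0 + 1)) (PySem.Dict.empty : PySem.Dict Char Int)).values
      = (PySem.Set.ofList line).map (fun k => (line.count k : Int)) := by
  rw [PySem.Dict.foldl_insert_getD_add_one_eq_counter]
  simp only [PySem.Dict.values, PySem.Dict.items_counter, List.map_map]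
  rfl

theorem any_count_eq_contains (d : List Char) (n : Nat) :
    ((getUniqueA d).any (fun c => d.count c == n))
      = (((PySem.Set.ofList d).map (fun k => (d.count k : Int))).contains ((n : Nat) : Int)) := by
  rw [Bool.eq_iff_iff]
  simp only [List.any_eq_true, mem_getUniqueA, List.contains_iff_exists_mem_beq, List.mem_map,
    beq_iff_eq, PySem.Set.mem_ofList, exists_exists_and_eq_and]
  constructor <;> rintro ⟨a, ha, h⟩ <;> exact ⟨a, ha, by omega⟩

theorem step_eq (st : Int × Int) (d : List Char) : computeStepA st d = computeStepB st d := by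
  unfold computeStepA computeStepB
  dsimp only
  rw [innerA_char, values_counts]
  simp only [Bool.not_false, Bool.true_and, any_count_eq_contains, Nat.cast_ofNat,
    List.contains_iff_exists_mem_beq, List.mem_map, beq_iff_eq, PySem.Set.mem_ofList,
    exists_exists_and_eq_and]
  split_ifs <;> simp_all

-- ===== VERDICT (by name: the statement is the Claim_ definition above) =====
theorem compute_spec : Claim_equal_compute := by
  intro data _
  unfold Spec_compute compute compute_alt
  have h : ∀ (ls : List (List Char)) (st : Int × Int),
      ls.foldl computeStepA st = ls.foldl computeStepB st := by
    intro ls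
    induction ls with
    | nil => intro st; rfl
    | cons d rest ih => intro st; simp [List.foldl, step_eq, ih]
  rw [h]
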